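-- pv_equiv track=rewrite | github.com/4TUResearchData/djehuty | src/djehuty/utils/html2md.py | handle_list_items
-- ===== SOURCE A (Python) =====
-- def handle_list_items(html):
--     """Helper procedure for 'handle_lists'."""
--     tag = '<li>'
--     endtag = '</li>'
--     items=[]
--     split_on_tag = html.split(tag)[1:]
--     for part in split_on_tag:
--         if endtag in part:
--             items.append(part.split(endtag, 1)[0])
--     return items
-- ===== SOURCE B (Python) =====
-- def handle_list_items(html):
--     """Helper procedure for 'handle_lists'.
--
--     Single cursor scan over the raw string: hop from one list-item open
--     tag to the next with str.find, bounding each segment by the following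
--     open tag, instead of materialising a split list."""
--     items = []
--     rest = html
--     while True:
--         i = rest.find('<li>')
--         if i < 0:
--             return items
--         rest = rest[i + 4:]
--         nxt = rest.find('<li>')
--         seg = rest if nxt < 0 else rest[:nxt]
--         end = seg.find('</li>')
--         if end >= 0:
--             items.append(seg[:end])
-- ===== Notes on version B (the rewrite author's own statement) =====
-- stated objective: alternative
-- what changed: Replaced the split-on-tag list construction with a single cursor scan that hops from one list-item open tag to the next via str.find, bounding each segment by the following open tag and never materialising an intermediate split list.
import Mathlib
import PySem

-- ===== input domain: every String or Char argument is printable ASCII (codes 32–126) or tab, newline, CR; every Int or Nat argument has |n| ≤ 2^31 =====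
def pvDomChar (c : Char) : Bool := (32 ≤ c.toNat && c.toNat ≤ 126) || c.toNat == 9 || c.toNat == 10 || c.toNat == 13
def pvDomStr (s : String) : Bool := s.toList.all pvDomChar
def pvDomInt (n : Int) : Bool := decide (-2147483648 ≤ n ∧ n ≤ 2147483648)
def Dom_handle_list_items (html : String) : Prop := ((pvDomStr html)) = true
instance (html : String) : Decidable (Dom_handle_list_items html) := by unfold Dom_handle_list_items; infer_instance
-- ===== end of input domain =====

-- B replaces A's split-list construction by a single cursor scan hopping from one list-item open tag to the next with find; equal output, same asymptotic cost (objective: alternative).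

-- the two tag literals both Pythons use (open and close list-item tags)
def pvTag : List Char := ['<', 'l', 'i', '>']
def pvEndTag : List Char := ['<', '/', 'l', 'i', '>']

-- ===== PORT A =====
-- literal port of A on the char-list side (PySem string primitives are defined on List Char);
-- '[1:]' is the slice, 'part.split(endtag, 1)[0]' is headI of the two-element split (nonempty, so [0] = headI)
def handle_list_items (html : String) : List String :=
  let split_on_tag := PySem.List.slice (PySem.Chars.splitOn html.toList pvTag) (some 1) none
  let items := split_on_tag.foldl
    (fun acc part =>
      if PySem.Chars.isIn pvEndTag part then
        acc ++ [(PySem.Chars.splitOnMax part pvEndTag 1).headI]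
      else acc) []
  items.map (fun cs => String.ofList cs)

-- ===== PORT B =====
-- literal port of B's while-loop: state = current suffix 'rest' and the accumulated items
def altGo (rest : List Char) (items : List (List Char)) : List (List Char) :=
  let i := PySem.Chars.find rest pvTag
  if i < 0 then items
  else
    let rest' := PySem.List.slice rest (some (i + 4)) none
    let nxt := PySem.Chars.find rest' pvTag
    let seg := if nxt < 0 then rest' else PySem.List.slice rest' none (some nxt)
    let e := PySem.Chars.find seg pvEndTag
    altGo rest' (if 0 ≤ e then items ++ [PySem.List.slice seg none (some e)] else items)
termination_by rest.length
decreasing_by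
  have hne : PySem.Chars.find rest pvTag ≠ -1 := by omega
  have hinf : pvTag <:+: rest := by
    by_contra hc
    exact hne ((PySem.Chars.find_eq_neg_one_iff rest pvTag).mpr hc)
  have hlen : 4 ≤ rest.length := hinf.length_le
  have h0 : (0:Int) ≤ PySem.Chars.find rest pvTag + 4 := by omega
  rw [PySem.List.slice_from rest h0]
  have : 4 ≤ (PySem.Chars.find rest pvTag + 4).toNat := by omega
  simp only [List.length_drop]
  omega

def handle_list_items_alt (html : String) : List String :=
  (altGo html.toList []).map (fun cs => String.ofList cs)

-- ===== PRECONDITION & SPEC =====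
def Spec_handle_list_items (html : String) (out : List String) : Prop := out = handle_list_items_alt html
instance (html : String) (out : List String) : Decidable (Spec_handle_list_items html out) := by unfold Spec_handle_list_items; infer_instance

-- ===== CLAIM (what is proved, stated in full; the proofs are below) =====
def Claim_equal_handle_list_items : Prop := ∀ (html : String), Dom_handle_list_items html → Spec_handle_list_items html (handle_list_items html)

-- ===== LEMMAS AND PROOFS =====

theorem pv_findgo_cases (sub : List Char) :
    ∀ (l : List Char) (k : Nat), PySem.Chars.find.go sub l k = -1 ∨ (k:Int) ≤ PySem.Chars.find.go sub l k := by
  intro l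
  induction l with
  | nil =>
    intro k
    by_cases he : sub.isEmpty <;> simp [PySem.Chars.find.go, he]
  | cons c t ih =>
    intro k
    simp only [PySem.Chars.find.go]
    split_ifs with hp
    · right; exact le_refl _
    · rcases ih (k+1) with h | h
      · left; exact h
      · right; push_cast at h ⊢; omega

theorem pv_find_cases (l sub : List Char) : 0 ≤ PySem.Chars.find l sub ∨ PySem.Chars.find l sub = -1 := by
  rcases pv_findgo_cases sub l 0 with h | h
  · right; exact h
  · left; exact_mod_cast h

theorem pv_findgo (sub : List Char) (hsub : sub ≠ []) :
    ∀ (l : List Char) (k : Nat), PySem.Chars.find.go sub l k =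
      (if PySem.Chars.find l sub = -1 then -1 else (k : Int) + PySem.Chars.find l sub) := by
  intro l
  induction l with
  | nil =>
    intro k
    have he : sub.isEmpty = false := by simpa [List.isEmpty_iff] using hsub
    simp [PySem.Chars.find, PySem.Chars.find.go, he]
  | cons c t ih =>
    intro k
    have hfind : PySem.Chars.find (c :: t) sub = PySem.Chars.find.go sub (c :: t) 0 := rfl
    by_cases hp : sub.isPrefixOf (c :: t)
    · rw [hfind]
      simp only [PySem.Chars.find.go, if_pos hp]
      norm_num
    · have h1 : PySem.Chars.find (c :: t) sub = PySem.Chars.find.go sub t 1 := by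
        rw [hfind]; simp only [PySem.Chars.find.go, if_neg hp]
      have h2 : PySem.Chars.find.go sub (c :: t) k = PySem.Chars.find.go sub t (k+1) := by
        simp only [PySem.Chars.find.go, if_neg hp]
      rw [h2, ih (k+1), h1, ih 1]
      rcases pv_find_cases t sub with h | h
      · rw [if_neg (by omega), if_neg (by omega), if_neg (by omega)]
        push_cast; ring
      · simp [h]

theorem pv_find_nil (sub : List Char) (hsub : sub ≠ []) : PySem.Chars.find [] sub = -1 := by
  have he : sub.isEmpty = false := by simpa [List.isEmpty_iff] using hsub
  simp [PySem.Chars.find, PySem.Chars.find.go, he]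

theorem pv_find_cons (sub : List Char) (hsub : sub ≠ []) (c : Char) (t : List Char) :
    PySem.Chars.find (c :: t) sub =
      (if sub.isPrefixOf (c :: t) then 0
       else if PySem.Chars.find t sub = -1 then -1 else 1 + PySem.Chars.find t sub) := by
  have h0 : PySem.Chars.find (c :: t) sub = PySem.Chars.find.go sub (c :: t) 0 := rfl
  rw [h0]
  simp only [PySem.Chars.find.go]
  split_ifs with hp h
  · rfl
  · rw [pv_findgo sub hsub t 1, if_pos h]
  · rw [pv_findgo sub hsub t 1, if_neg h]; push_cast; ring

theorem pv_splitOn_go_spec (sep : List Char) (hsep : sep ≠ []) :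
    ∀ (n : Nat) (l : List Char), l.length ≤ n → ∀ (fuel : Nat) (cur : List Char) (acc : List (List Char)),
      l.length < fuel →
      PySem.Chars.splitOn.go sep fuel l cur acc =
        acc.reverse ++
          (cur.reverse ++ (if PySem.Chars.find l sep = -1 then l else l.take (PySem.Chars.find l sep).toNat)) ::
          (if PySem.Chars.find l sep = -1 then []
           else PySem.Chars.splitOn (l.drop ((PySem.Chars.find l sep).toNat + sep.length)) sep) := by
  have hs1 : 1 ≤ sep.length := by
    cases sep with
    | nil => exact absurd rfl hsep
    | cons a b => simp
  intro n
  induction n with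
  | zero =>
    intro l hl fuel cur acc hfuel
    have hl0 : l = [] := List.length_eq_zero_iff.mp (Nat.le_zero.mp hl)
    subst hl0
    obtain ⟨f, rfl⟩ : ∃ f, fuel = f + 1 := ⟨fuel - 1, by omega⟩
    simp [PySem.Chars.splitOn.go, pv_find_nil sep hsep]
  | succ n ih =>
    intro l hl fuel cur acc hfuel
    obtain ⟨f, rfl⟩ : ∃ f, fuel = f + 1 := ⟨fuel - 1, by omega⟩
    cases l with
    | nil => simp [PySem.Chars.splitOn.go, pv_find_nil sep hsep]
    | cons c t =>
      by_cases hp : sep.isPrefixOf (c :: t)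
      · have hgo : PySem.Chars.splitOn.go sep (f+1) (c :: t) cur acc =
            PySem.Chars.splitOn.go sep f (List.drop sep.length (c :: t)) [] (cur.reverse :: acc) := by
          simp only [PySem.Chars.splitOn.go, if_pos hp]
        have hfind : PySem.Chars.find (c :: t) sep = 0 := by
          rw [pv_find_cons sep hsep, if_pos hp]
        have hrlen : (List.drop sep.length (c :: t)).length ≤ n := by
          simp only [List.length_drop, List.length_cons]
          simp only [List.length_cons] at hl
          omega
        have hrfuel : (List.drop sep.length (c :: t)).length < f := by
          simp only [List.length_drop, List.length_cons]
          simp only [List.length_cons] at hfuel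
          omega
        rw [hgo, ih _ hrlen f [] (cur.reverse :: acc) hrfuel]
        have hsplit : PySem.Chars.splitOn (List.drop sep.length (c :: t)) sep =
            (if PySem.Chars.find (List.drop sep.length (c :: t)) sep = -1 then (List.drop sep.length (c :: t))
             else (List.drop sep.length (c :: t)).take (PySem.Chars.find (List.drop sep.length (c :: t)) sep).toNat) ::
            (if PySem.Chars.find (List.drop sep.length (c :: t)) sep = -1 then []
             else PySem.Chars.splitOn ((List.drop sep.length (c :: t)).drop ((PySem.Chars.find (List.drop sep.length (c :: t)) sep).toNat + sep.length)) sep) := by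
          show PySem.Chars.splitOn.go sep _ _ [] [] = _
          rw [ih _ hrlen _ [] [] (by omega)]
          simp
        rw [hfind]
        norm_num
        rw [hsplit]
        simp
      · have hgo : PySem.Chars.splitOn.go sep (f+1) (c :: t) cur acc =
            PySem.Chars.splitOn.go sep f t (c :: cur) acc := by
          simp only [PySem.Chars.splitOn.go, if_neg hp]
        have htlen : t.length ≤ n := by simp only [List.length_cons] at hl; omega
        have htfuel : t.length < f := by simp only [List.length_cons] at hfuel; omega
        rw [hgo, ih _ htlen f (c :: cur) acc htfuel]
        rw [pv_find_cons sep hsep c t, if_neg hp]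
        rcases pv_find_cases t sep with h | h
        · have hne : ¬ PySem.Chars.find t sep = -1 := by omega
          simp only [if_neg hne]
          have hne2 : ¬ ((1 : Int) + PySem.Chars.find t sep) = -1 := by omega
          simp only [if_neg hne2]
          have h1 : ((1 : Int) + PySem.Chars.find t sep).toNat = (PySem.Chars.find t sep).toNat + 1 := by omega
          rw [h1]
          have h2 : (PySem.Chars.find t sep).toNat + 1 + sep.length = ((PySem.Chars.find t sep).toNat + sep.length) + 1 := by omega
          rw [h2]
          simp
        · simp [h]

theorem pv_splitOn_eq (sep : List Char) (hsep : sep ≠ []) (l : List Char) :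
    PySem.Chars.splitOn l sep =
      (if PySem.Chars.find l sep = -1 then l else l.take (PySem.Chars.find l sep).toNat) ::
      (if PySem.Chars.find l sep = -1 then []
       else PySem.Chars.splitOn (l.drop ((PySem.Chars.find l sep).toNat + sep.length)) sep) := by
  show PySem.Chars.splitOn.go sep _ _ [] [] = _
  rw [pv_splitOn_go_spec sep hsep l.length l le_rfl _ [] [] (by omega)]
  simp

theorem pv_splitOnMax_go_zero (sep : List Char) :
    ∀ (r : List Char) (fuel : Nat) (acc : List (List Char)), r.length < fuel →
      PySem.Chars.splitOnMax.go sep fuel 0 r [] acc = acc.reverse ++ [r] := by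
  intro r fuel acc hfuel
  obtain ⟨f, rfl⟩ : ∃ f, fuel = f + 1 := ⟨fuel - 1, by omega⟩
  cases r with
  | nil => simp [PySem.Chars.splitOnMax.go]
  | cons c t => simp [PySem.Chars.splitOnMax.go]

theorem pv_splitOnMax_one (sep : List Char) (hsep : sep ≠ []) :
    ∀ (n : Nat) (l : List Char), l.length ≤ n → ∀ (fuel : Nat) (cur : List Char) (acc : List (List Char)),
      l.length < fuel →
      PySem.Chars.splitOnMax.go sep fuel 1 l cur acc =
        acc.reverse ++
          (if PySem.Chars.find l sep = -1 then [cur.reverse ++ l]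
           else [cur.reverse ++ l.take (PySem.Chars.find l sep).toNat,
                 l.drop ((PySem.Chars.find l sep).toNat + sep.length)]) := by
  have hs1 : 1 ≤ sep.length := by
    cases sep with
    | nil => exact absurd rfl hsep
    | cons a b => simp
  intro n
  induction n with
  | zero =>
    intro l hl fuel cur acc hfuel
    have hl0 : l = [] := List.length_eq_zero_iff.mp (Nat.le_zero.mp hl)
    subst hl0
    obtain ⟨f, rfl⟩ : ∃ f, fuel = f + 1 := ⟨fuel - 1, by omega⟩
    simp [PySem.Chars.splitOnMax.go, pv_find_nil sep hsep]
  | succ n ih =>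
    intro l hl fuel cur acc hfuel
    obtain ⟨f, rfl⟩ : ∃ f, fuel = f + 1 := ⟨fuel - 1, by omega⟩
    cases l with
    | nil => simp [PySem.Chars.splitOnMax.go, pv_find_nil sep hsep]
    | cons c t =>
      by_cases hp : sep.isPrefixOf (c :: t)
      · have hgo : PySem.Chars.splitOnMax.go sep (f+1) 1 (c :: t) cur acc =
            PySem.Chars.splitOnMax.go sep f 0 (List.drop sep.length (c :: t)) [] (cur.reverse :: acc) := by
          have hp' : sep <+: c :: t := by simpa using hp
          simp [PySem.Chars.splitOnMax.go, hp']
        have hfind : PySem.Chars.find (c :: t) sep = 0 := by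
          rw [pv_find_cons sep hsep, if_pos hp]
        have hrfuel : (List.drop sep.length (c :: t)).length < f := by
          simp only [List.length_drop, List.length_cons]
          simp only [List.length_cons] at hfuel
          omega
        rw [hgo, pv_splitOnMax_go_zero sep _ f _ hrfuel, hfind]
        norm_num
      · have hgo : PySem.Chars.splitOnMax.go sep (f+1) 1 (c :: t) cur acc =
            PySem.Chars.splitOnMax.go sep f 1 t (c :: cur) acc := by
          have hp' : ¬ sep <+: c :: t := by simpa using hp
          simp [PySem.Chars.splitOnMax.go, hp']
        have htlen : t.length ≤ n := by simp only [List.length_cons] at hl; omega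
        have htfuel : t.length < f := by simp only [List.length_cons] at hfuel; omega
        rw [hgo, ih _ htlen f (c :: cur) acc htfuel]
        rw [pv_find_cons sep hsep c t, if_neg hp]
        rcases pv_find_cases t sep with h | h
        · have hne : ¬ PySem.Chars.find t sep = -1 := by omega
          simp only [if_neg hne]
          have hne2 : ¬ ((1 : Int) + PySem.Chars.find t sep) = -1 := by omega
          simp only [if_neg hne2]
          have h1 : ((1 : Int) + PySem.Chars.find t sep).toNat = (PySem.Chars.find t sep).toNat + 1 := by omega
          rw [h1]
          have h2 : (PySem.Chars.find t sep).toNat + 1 + sep.length = ((PySem.Chars.find t sep).toNat + sep.length) + 1 := by omega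
          rw [h2]
          simp
        · simp [h]

theorem pv_splitOnMax_one_eq (sep : List Char) (hsep : sep ≠ []) (l : List Char) :
    PySem.Chars.splitOnMax l sep 1 =
      (if PySem.Chars.find l sep = -1 then [l]
       else [l.take (PySem.Chars.find l sep).toNat, l.drop ((PySem.Chars.find l sep).toNat + sep.length)]) := by
  have h : PySem.Chars.splitOnMax l sep 1 = PySem.Chars.splitOnMax.go sep (l.length + 1) 1 l [] [] := by
    simp [PySem.Chars.splitOnMax]
  rw [h, pv_splitOnMax_one sep hsep l.length l le_rfl _ [] [] (by omega)]
  simp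

-- what A's loop computes over a parts list
def pvAItems (l : List Char) : List (List Char) :=
  ((PySem.Chars.splitOn l pvTag).tail.filter (fun part => PySem.Chars.isIn pvEndTag part)).map
    (fun part => (PySem.Chars.splitOnMax part pvEndTag 1).headI)

-- the cursor scan equals A's filter/map over the split parts
theorem pv_tag_ne : pvTag ≠ [] := by decide

theorem pv_endtag_ne : pvEndTag ≠ [] := by decide

theorem pv_altGo_spec :
    ∀ (n : Nat) (l : List Char), l.length ≤ n → ∀ (acc : List (List Char)),
      altGo l acc = acc ++ pvAItems l := by
  intro n
  induction n with
  | zero =>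
    intro l hl acc
    have hl0 : l = [] := List.length_eq_zero_iff.mp (Nat.le_zero.mp hl)
    subst hl0
    have hf : PySem.Chars.find ([] : List Char) pvTag = -1 := pv_find_nil _ pv_tag_ne
    rw [altGo, if_pos (by rw [hf]; decide)]
    simp [pvAItems, pv_splitOn_eq pvTag pv_tag_ne, hf]
  | succ n ih =>
    intro l hl acc
    rcases pv_find_cases l pvTag with hi | hf
    case inr =>
      rw [altGo, if_pos (by rw [hf]; decide)]
      simp [pvAItems, pv_splitOn_eq pvTag pv_tag_ne, hf]
    case inl =>
      have hne : ¬ PySem.Chars.find l pvTag = -1 := by omega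
      have hinf : pvTag <:+: l := by
        by_contra hc
        exact hne ((PySem.Chars.find_eq_neg_one_iff l pvTag).mpr hc)
      have hlen4 : 4 ≤ l.length := hinf.length_le
      rw [altGo, if_neg (by omega)]
      dsimp only
      have hslice : PySem.List.slice l (some (PySem.Chars.find l pvTag + 4)) none
          = List.drop ((PySem.Chars.find l pvTag).toNat + 4) l := by
        rw [PySem.List.slice_from l (by omega)]
        congr 1
        omega
      rw [hslice]
      have hsplit_l : (PySem.Chars.splitOn l pvTag).tail
          = PySem.Chars.splitOn (List.drop ((PySem.Chars.find l pvTag).toNat + 4) l) pvTag := by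
        rw [pv_splitOn_eq pvTag pv_tag_ne l, List.tail_cons, if_neg hne]
        norm_num [pvTag]
      have hseg : (if PySem.Chars.find (List.drop ((PySem.Chars.find l pvTag).toNat + 4) l) pvTag < 0
            then List.drop ((PySem.Chars.find l pvTag).toNat + 4) l
            else PySem.List.slice (List.drop ((PySem.Chars.find l pvTag).toNat + 4) l) none
                   (some (PySem.Chars.find (List.drop ((PySem.Chars.find l pvTag).toNat + 4) l) pvTag)))
          = (if PySem.Chars.find (List.drop ((PySem.Chars.find l pvTag).toNat + 4) l) pvTag = -1
             then List.drop ((PySem.Chars.find l pvTag).toNat + 4) l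
             else (List.drop ((PySem.Chars.find l pvTag).toNat + 4) l).take
                    (PySem.Chars.find (List.drop ((PySem.Chars.find l pvTag).toNat + 4) l) pvTag).toNat) := by
        rcases pv_find_cases (List.drop ((PySem.Chars.find l pvTag).toNat + 4) l) pvTag with h | h
        · rw [if_neg (by omega), if_neg (by omega), PySem.List.slice_to _ h]
        · rw [if_pos (by omega), if_pos h]
      rw [hseg]
      set r := List.drop ((PySem.Chars.find l pvTag).toNat + 4) l with hrdef
      set seg := (if PySem.Chars.find r pvTag = -1 then r else r.take (PySem.Chars.find r pvTag).toNat) with hsegdef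
      have hrlen : r.length ≤ n := by
        rw [hrdef]
        simp only [List.length_drop]
        omega
      have hstep : pvAItems l =
          (if PySem.Chars.isIn pvEndTag seg then [(PySem.Chars.splitOnMax seg pvEndTag 1).headI] else []) ++
            pvAItems r := by
        unfold pvAItems
        rw [hsplit_l]
        rw [pv_splitOn_eq pvTag pv_tag_ne r]
        rw [← hsegdef]
        simp only [List.tail_cons, List.filter_cons]
        by_cases hp : PySem.Chars.isIn pvEndTag seg
        · rw [if_pos hp, if_pos hp]
          simp
        · rw [if_neg hp, if_neg hp]
          simp
      rw [ih r hrlen, hstep]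
      rcases pv_find_cases seg pvEndTag with he | he
      · have hin : PySem.Chars.isIn pvEndTag seg = true := by
          simp only [PySem.Chars.isIn, bne_iff_ne]
          omega
        rw [if_pos he, if_pos hin]
        rw [pv_splitOnMax_one_eq pvEndTag pv_endtag_ne seg, if_neg (by omega)]
        rw [PySem.List.slice_to seg he]
        simp
      · have hin : PySem.Chars.isIn pvEndTag seg = false := by
          simp [PySem.Chars.isIn, he]
        rw [if_neg (by omega), hin]
        simp

-- ===== VERDICT (by name: the statement is the Claim_ definition above) =====
theorem handle_list_items_spec : Claim_equal_handle_list_items := by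
  intro html _
  unfold Spec_handle_list_items handle_list_items handle_list_items_alt
  simp only [PySem.List.slice_from_one, PySem.List.foldl_append_if]
  rw [pv_altGo_spec html.toList.length html.toList le_rfl []]
  simp [pvAItems]
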